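-- pv_equiv track=rewrite | github.com/GareemaRanjan/coding_practice | shaquille/capital/Question_4.py | solution
-- ===== SOURCE A (Python) =====
-- def solution(operations):
--     saved_rectangles = []
--     result = []
--
--     for op in operations:
--         if op[0] == 0:
--             # Save the rectangle with sorted sides
--             a, b = op[1], op[2]
--             s_small = min(a, b)
--             s_large = max(a, b)
--             saved_rectangles.append((s_small, s_large))
--         elif op[0] == 1:
--             # Check if the box can fit into all saved rectangles
--             a, b = op[1], op[2]
--             w_small = min(a, b)
--             w_large = max(a, b)
--
--             if not saved_rectangles:
--                 # By definition, it fits when there are no saved rectangles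
--                 result.append('true')
--             else:
--                 can_fit = True
--                 for s_small, s_large in saved_rectangles:
--                     if w_small > s_small or w_large > s_large:
--                         can_fit = False
--                         break
--                 result.append(str(can_fit).lower())
--
--     return result
-- ===== SOURCE B (Python) =====
-- def solution(operations):
--     # Keep only the running minima of the sorted sides of all saved rectangles.
--     result = []
--     min_small = None
--     min_large = None
--     for op in operations:
--         if op[0] == 0:
--             lo = min(op[1], op[2])
--             hi = max(op[1], op[2])
--             if min_small is None:
--                 min_small, min_large = lo, hi
--             else:
--                 min_small = min(min_small, lo)
--                 min_large = min(min_large, hi)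
--         elif op[0] == 1:
--             lo = min(op[1], op[2])
--             hi = max(op[1], op[2])
--             if min_small is None or (lo <= min_small and hi <= min_large):
--                 result.append('true')
--             else:
--                 result.append('false')
--     return result
-- ===== Notes on version B (the rewrite author's own statement) =====
-- stated objective: alternative
-- what changed: B keeps only the running minimum of the small sides and of the large sides of the saved rectangles instead of the whole list, answering each query with one comparison instead of scanning the saved rectangles; per-query cost drops from O(S) worst case to O(1), though A's early break makes the two comparable on typical inputs.
import Mathlib
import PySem

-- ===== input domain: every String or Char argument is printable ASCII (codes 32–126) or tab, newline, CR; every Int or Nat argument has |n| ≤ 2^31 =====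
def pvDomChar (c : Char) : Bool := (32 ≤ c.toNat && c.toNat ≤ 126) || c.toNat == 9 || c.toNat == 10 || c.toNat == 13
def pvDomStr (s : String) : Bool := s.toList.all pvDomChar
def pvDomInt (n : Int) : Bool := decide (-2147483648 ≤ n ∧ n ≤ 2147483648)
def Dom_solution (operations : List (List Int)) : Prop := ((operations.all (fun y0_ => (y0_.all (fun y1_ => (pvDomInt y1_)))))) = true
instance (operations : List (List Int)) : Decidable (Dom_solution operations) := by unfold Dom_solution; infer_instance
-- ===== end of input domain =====

-- B replaces A's stored list of rectangles and per-query scan by a running minimum of both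
-- sorted dimensions, a different algorithm of comparable measured cost (objective: alternative).

-- ===== PORT A =====
-- A's inner `for … break` loop over the saved rectangles
def aFit (ws wl : Int) : List (Int × Int) → Bool
  | [] => true
  | (s, l) :: rest => if ws > s || wl > l then false else aFit ws wl rest

def solStepA (st : List (Int × Int) × List String) (op : List Int) :
    List (Int × Int) × List String :=
  let saved := st.1
  let result := st.2
  if PySem.List.pyGetD op 0 2 = 0 then
    let a := PySem.List.pyGetD op 1 0
    let b := PySem.List.pyGetD op 2 0
    (saved ++ [(min a b, max a b)], result)
  else if PySem.List.pyGetD op 0 2 = 1 then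
    let a := PySem.List.pyGetD op 1 0
    let b := PySem.List.pyGetD op 2 0
    let ws := min a b
    let wl := max a b
    if saved = [] then (saved, result ++ ["true"])
    else (saved, result ++ [if aFit ws wl saved then "true" else "false"])
  else st

def solution (operations : List (List Int)) : List String :=
  (operations.foldl solStepA ([], [])).2

-- ===== PORT B =====
def solStepB (st : Option (Int × Int) × List String) (op : List Int) :
    Option (Int × Int) × List String :=
  let m := st.1
  let result := st.2
  if PySem.List.pyGetD op 0 2 = 0 then
    let lo := min (PySem.List.pyGetD op 1 0) (PySem.List.pyGetD op 2 0)
    let hi := max (PySem.List.pyGetD op 1 0) (PySem.List.pyGetD op 2 0)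
    match m with
    | none => (some (lo, hi), result)
    | some (ms, ml) => (some (min ms lo, min ml hi), result)
  else if PySem.List.pyGetD op 0 2 = 1 then
    let lo := min (PySem.List.pyGetD op 1 0) (PySem.List.pyGetD op 2 0)
    let hi := max (PySem.List.pyGetD op 1 0) (PySem.List.pyGetD op 2 0)
    match m with
    | none => (m, result ++ ["true"])
    | some (ms, ml) =>
        if lo ≤ ms ∧ hi ≤ ml then (m, result ++ ["true"]) else (m, result ++ ["false"])
  else st

def solution_alt (operations : List (List Int)) : List String :=
  (operations.foldl solStepB (none, [])).2

-- ===== PRECONDITION & SPEC =====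
-- Pre_ excludes exactly the inputs on which Python A raises an IndexError: an empty
-- operation list, or a save/query operation (first entry 0 or 1) with fewer than 3 entries.
def Pre_solution (operations : List (List Int)) : Prop :=
  ∀ op ∈ operations, op ≠ [] ∧ ((op.headI = 0 ∨ op.headI = 1) → 3 ≤ op.length)
instance (operations : List (List Int)) : Decidable (Pre_solution operations) := by
  unfold Pre_solution; infer_instance
def pvWitness_solution : List (List Int) := [[1, 2, 3], [0, 5, 4], [1, 4, 5], [1, 6, 1], [7]]

def Spec_solution (operations : List (List Int)) (out : List String) : Prop := out = solution_alt operations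
instance (operations : List (List Int)) (out : List String) : Decidable (Spec_solution operations out) := by unfold Spec_solution; infer_instance

-- ===== CLAIM (what is proved, stated in full; the proofs are below) =====
def Claim_equal_solution : Prop := ∀ (operations : List (List Int)), Dom_solution operations → Pre_solution operations → Spec_solution operations (solution operations)

-- ===== LEMMAS AND PROOFS =====

-- invariant tying A's saved list to B's running minima
def RectRel (saved : List (Int × Int)) : Option (Int × Int) → Prop
  | none => saved = []
  | some (ms, ml) =>
      saved ≠ [] ∧ ∀ ws wl, aFit ws wl saved = (decide (ws ≤ ms) && decide (wl ≤ ml))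

theorem aFit_append (ws wl : Int) (l1 l2 : List (Int × Int)) :
    aFit ws wl (l1 ++ l2) = (aFit ws wl l1 && aFit ws wl l2) := by
  induction l1 with
  | nil => simp [aFit]
  | cons p rest ih =>
      obtain ⟨s, l⟩ := p
      by_cases h : ws > s || wl > l <;> simp [aFit, h, ih]

theorem aFit_single (ws wl lo hi : Int) :
    aFit ws wl [(lo, hi)] = (decide (ws ≤ lo) && decide (wl ≤ hi)) := by
  by_cases h1 : lo < ws <;> by_cases h2 : hi < wl <;>
    simp [aFit, h1, h2] <;> omega

theorem minmerge (ms ml lo hi ws wl : Int) :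
    (decide (ws ≤ ms) && decide (wl ≤ ml) && (decide (ws ≤ lo) && decide (wl ≤ hi)))
      = (decide (ws ≤ min ms lo) && decide (wl ≤ min ml hi)) := by
  rw [Bool.eq_iff_iff]
  simp only [Bool.and_eq_true, decide_eq_true_eq]
  omega

theorem rel_step (saved : List (Int × Int)) (m : Option (Int × Int)) (res : List String)
    (op : List Int) (h : RectRel saved m) :
    RectRel (solStepA (saved, res) op).1 (solStepB (m, res) op).1 ∧
      (solStepA (saved, res) op).2 = (solStepB (m, res) op).2 := by
  by_cases h0 : PySem.List.pyGetD op 0 2 = 0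
  · -- save operation
    have ha : solStepA (saved, res) op =
        (saved ++ [(min (PySem.List.pyGetD op 1 0) (PySem.List.pyGetD op 2 0),
                    max (PySem.List.pyGetD op 1 0) (PySem.List.pyGetD op 2 0))], res) := by
      simp [solStepA, h0]
    match m with
    | none =>
        simp only [RectRel] at h
        subst h
        have hb : solStepB (none, res) op =
            (some (min (PySem.List.pyGetD op 1 0) (PySem.List.pyGetD op 2 0),
                   max (PySem.List.pyGetD op 1 0) (PySem.List.pyGetD op 2 0)), res) := by
          simp [solStepB, h0]
        rw [ha, hb]
        exact ⟨⟨by simp, fun ws wl => aFit_single ws wl _ _⟩, rfl⟩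
    | some (ms, ml) =>
        obtain ⟨hne, hq⟩ := h
        have hb : solStepB (some (ms, ml), res) op =
            (some (min ms (min (PySem.List.pyGetD op 1 0) (PySem.List.pyGetD op 2 0)),
                   min ml (max (PySem.List.pyGetD op 1 0) (PySem.List.pyGetD op 2 0))), res) := by
          simp [solStepB, h0]
        rw [ha, hb]
        refine ⟨⟨by simp, fun ws wl => ?_⟩, rfl⟩
        rw [aFit_append, hq, aFit_single, minmerge]
  · by_cases h1 : PySem.List.pyGetD op 0 2 = 1
    · -- query operation
      match m with
      | none =>
          simp only [RectRel] at h
          subst h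
          simp [solStepA, solStepB, h1, RectRel]
      | some (ms, ml) =>
          obtain ⟨hne, hq⟩ := h
          have ha : solStepA (saved, res) op =
              (saved, res ++ [if aFit (min (PySem.List.pyGetD op 1 0) (PySem.List.pyGetD op 2 0))
                  (max (PySem.List.pyGetD op 1 0) (PySem.List.pyGetD op 2 0)) saved
                  then "true" else "false"]) := by
            simp [solStepA, h1, hne]
          by_cases hC : min (PySem.List.pyGetD op 1 0) (PySem.List.pyGetD op 2 0) ≤ ms ∧
              max (PySem.List.pyGetD op 1 0) (PySem.List.pyGetD op 2 0) ≤ ml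
          · have hb : solStepB (some (ms, ml), res) op = (some (ms, ml), res ++ ["true"]) := by
              simp [solStepB, h1, hC]
            rw [ha, hb]
            refine ⟨⟨hne, hq⟩, ?_⟩
            rw [hq]
            simp [hC.1, hC.2]
          · have hb : solStepB (some (ms, ml), res) op = (some (ms, ml), res ++ ["false"]) := by
              simp [solStepB, h1]
              omega
            rw [ha, hb]
            refine ⟨⟨hne, hq⟩, ?_⟩
            rw [hq]
            simp
            omega
    · -- ignored operation
      exact ⟨by simpa [solStepA, solStepB, h0, h1] using h,
             by simp [solStepA, solStepB, h0, h1]⟩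

theorem fold_eq (ops : List (List Int)) :
    ∀ (saved : List (Int × Int)) (m : Option (Int × Int)) (res : List String),
      RectRel saved m →
      (ops.foldl solStepA (saved, res)).2 = (ops.foldl solStepB (m, res)).2 := by
  induction ops with
  | nil => intro _ _ _ _; rfl
  | cons op rest ih =>
      intro saved m res h
      obtain ⟨h1, h2⟩ := rel_step saved m res op h
      simp only [List.foldl_cons]
      calc (rest.foldl solStepA (solStepA (saved, res) op)).2
          = (rest.foldl solStepA ((solStepA (saved, res) op).1, (solStepA (saved, res) op).2)).2 := by rfl
        _ = (rest.foldl solStepB ((solStepB (m, res) op).1, (solStepB (m, res) op).2)).2 := by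
              rw [h2]; exact ih _ _ _ h1
        _ = (rest.foldl solStepB (solStepB (m, res) op)).2 := by rfl

-- ===== VERDICT (by name: the statement is the Claim_ definition above) =====
theorem solution_spec : Claim_equal_solution := by
  intro ops _ _
  unfold Spec_solution solution solution_alt
  exact fold_eq ops [] none [] rfl
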